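-- pv_equiv track=rewrite | github.com/henhenmao/leetcode | 2566_maximum_difference_by_remapping_a_digit.py | minMaxDifference
-- ===== SOURCE A (Python) =====
-- def minMaxDifference(num: int) -> int:
--     # find the digits
--     num = str(num)
--     min_digit = num[0]
--     max_digit = -1
--     for digit in num:
--         if digit != "9":
--             max_digit = digit
--             break
--
--     # build new numbers
--     min_num = ""
--     max_num = ""
--     for digit in num:
--         # building minimum
--         if digit == min_digit:
--             min_num += "0"
--         else:
--             min_num += digit
--
--         # building maximum
--         if digit == max_digit:
--             max_num += "9"
--         else:
--             max_num += digit
--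
--     return (int(max_num) - int(min_num))
-- ===== SOURCE B (Python) =====
-- def minMaxDifference(num: int) -> int:
--     s = str(num)
--     lo = s[0]
--
--     def go(i, hi):
--         # one fused pass: discovers the digit to maximise on the way down,
--         # builds both remapped strings back-to-front on the way up
--         if i == len(s):
--             return ("", "")
--         c = s[i]
--         if hi is None and c != "9":
--             hi = c
--         mn, mx = go(i + 1, hi)
--         return (("0" if c == lo else c) + mn, ("9" if c == hi else c) + mx)
--
--     mn, mx = go(0, None)
--     return int(mx) - int(mn)
-- ===== Notes on version B (the rewrite author's own statement) =====
-- stated objective: alternative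
-- what changed: A first scans for the first non-'9' digit with a break loop and then runs a second forward loop appending characters to two string accumulators; B is a single fused recursive pass that discovers the digit to maximise on the way down and builds both remapped strings back-to-front on the way up, with no separate scan and no accumulators.
import Mathlib
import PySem

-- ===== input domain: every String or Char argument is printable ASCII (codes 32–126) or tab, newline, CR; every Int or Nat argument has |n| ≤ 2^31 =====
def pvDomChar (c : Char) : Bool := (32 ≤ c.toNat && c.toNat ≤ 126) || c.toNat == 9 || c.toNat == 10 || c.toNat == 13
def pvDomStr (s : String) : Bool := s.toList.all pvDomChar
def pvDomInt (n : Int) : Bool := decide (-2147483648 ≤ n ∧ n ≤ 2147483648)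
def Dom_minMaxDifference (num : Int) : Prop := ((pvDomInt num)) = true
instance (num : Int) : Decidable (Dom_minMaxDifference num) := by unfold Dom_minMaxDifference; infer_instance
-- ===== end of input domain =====

-- B replaces A's two forward loops (a break-scan for the first non-'9' digit, then a
-- char-appending build loop) by one fused recursive pass that discovers the digit to
-- maximise on the way down and builds both remapped strings back-to-front; objective: alternative.


-- ===== PORT A =====
-- A's first loop: scan for the first digit ≠ '9', break when found; `none` models
-- A's int sentinel -1 (which compares unequal to every character).
def pvFindMax : List Char → Option Char
  | [] => none
  | c :: t => if c ≠ '9' then some c else pvFindMax t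

def minMaxDifference (num : Int) : Int :=
  let s := PySem.Int.toChars num            -- num = str(num)
  match PySem.List.pyGet? s 0 with          -- min_digit = num[0] (str(int) is never empty, so `none` is unreachable)
  | none => 0
  | some minD =>
    let maxD := pvFindMax s
    -- second loop: build min_num and max_num together, appending one char per step
    let p := s.foldl (fun (acc : List Char × List Char) d =>
        (acc.1 ++ [if d = minD then '0' else d],
         acc.2 ++ [if maxD = some d then '9' else d])) ([], [])
    -- int(max_num) - int(min_num); both strings are nonempty digit strings, so `none` is unreachable
    (PySem.Int.ofChars? p.2).getD 0 - (PySem.Int.ofChars? p.1).getD 0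

-- ===== PORT B =====
-- B's recursive helper go(i, hi): recursion on the suffix s[i:]; `hi` is the
-- not-yet/already discovered digit to maximise (None → Option.none)
def pvGoB (lo : Char) : List Char → Option Char → (List Char × List Char)
  | [], _ => ([], [])
  | c :: t, hi =>
    let hi' := if hi = none ∧ c ≠ '9' then some c else hi   -- if hi is None and c != "9": hi = c
    let p := pvGoB lo t hi'                                 -- mn, mx = go(i + 1, hi)
    ((if c = lo then '0' else c) :: p.1,                    -- ("0" if c == lo else c) + mn
     (if hi' = some c then '9' else c) :: p.2)              -- ("9" if c == hi else c) + mx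

def minMaxDifference_alt (num : Int) : Int :=
  let s := PySem.Int.toChars num                 -- s = str(num)
  match PySem.List.pyGet? s 0 with               -- lo = s[0] (str(int) is never empty, so `none` is unreachable)
  | none => 0
  | some lo =>
    let p := pvGoB lo s none                     -- mn, mx = go(0, None)
    (PySem.Int.ofChars? p.2).getD 0 - (PySem.Int.ofChars? p.1).getD 0   -- int(mx) - int(mn)

-- ===== PRECONDITION & SPEC =====
def Spec_minMaxDifference (num : Int) (out : Int) : Prop := out = minMaxDifference_alt num
instance (num : Int) (out : Int) : Decidable (Spec_minMaxDifference num out) := by unfold Spec_minMaxDifference; infer_instance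

-- ===== CLAIM (what is proved, stated in full; the proofs are below) =====
def Claim_equal_minMaxDifference : Prop := ∀ (num : Int), Dom_minMaxDifference num → Spec_minMaxDifference num (minMaxDifference num)

-- ===== LEMMAS AND PROOFS =====

-- A's combined build loop produces the pair of character maps
lemma foldl_pair_map (f g : Char → Char) :
    ∀ (s a b : List Char),
      s.foldl (fun (acc : List Char × List Char) d => (acc.1 ++ [f d], acc.2 ++ [g d])) (a, b)
        = (a ++ s.map f, b ++ s.map g) := by
  intro s
  induction s with
  | nil => intro a b; simp
  | cons d t ih => intro a b; simp [List.foldl_cons, ih]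

-- once B's pass has fixed the digit to maximise, it produces the two character maps
lemma pvGoB_some (lo h : Char) :
    ∀ (t : List Char),
      pvGoB lo t (some h)
        = (t.map (fun c => if c = lo then '0' else c),
           t.map (fun c => if c = h then '9' else c)) := by
  intro t
  induction t with
  | nil => simp [pvGoB]
  | cons c t ih =>
    rw [pvGoB]
    simp only [reduceCtorEq, false_and, if_false, ih, List.map_cons, Prod.mk.injEq,
      Option.some.injEq]
    refine ⟨trivial, ?_⟩
    congr 1
    by_cases hc : c = h
    · simp [hc]
    · simp [hc, (show ¬ h = c from fun he => hc he.symm)]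

-- B's pass from the undiscovered state produces A's maps, with the digit A's scan finds
lemma pvGoB_none (lo : Char) :
    ∀ (t : List Char),
      pvGoB lo t none
        = (t.map (fun c => if c = lo then '0' else c),
           t.map (fun c => if pvFindMax t = some c then '9' else c)) := by
  intro t
  induction t with
  | nil => simp [pvGoB]
  | cons c t ih =>
    by_cases hc : c = '9'
    · -- still scanning: c = '9' stays '9' on the max side
      subst hc
      rw [pvGoB]
      simp only [ne_eq, not_true_eq_false, and_false, if_false, ih, List.map_cons,
        Prod.mk.injEq]
      rw [show pvFindMax ('9' :: t) = pvFindMax t from by rw [pvFindMax]; simp]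
      refine ⟨trivial, ?_⟩
      congr 1
      simp
    · -- first non-'9' digit found here
      rw [pvGoB]
      rw [if_pos (show (none : Option Char) = none ∧ c ≠ '9' from ⟨rfl, hc⟩), pvGoB_some]
      rw [show pvFindMax (c :: t) = some c from by rw [pvFindMax]; simp [hc]]
      simp only [List.map_cons, Prod.mk.injEq, Option.some.injEq]
      refine ⟨trivial, ?_⟩
      congr 1
      refine List.map_congr_left ?_
      intro d _
      by_cases hd : d = c
      · simp [hd]
      · simp [hd, (show ¬ c = d from fun he => hd he.symm)]

-- ===== VERDICT (by name: the statement is the Claim_ definition above) =====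
theorem minMaxDifference_spec : Claim_equal_minMaxDifference := by
  intro num _
  unfold Spec_minMaxDifference minMaxDifference minMaxDifference_alt
  set s := PySem.Int.toChars num
  cases hget : PySem.List.pyGet? s 0 with
  | none => simp [hget]
  | some c0 =>
    simp only [hget]
    rw [foldl_pair_map (fun d => if d = c0 then '0' else d)
          (fun d => if pvFindMax s = some d then '9' else d),
        pvGoB_none]
    simp
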